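-- pv_equiv track=rewrite | github.com/blgcismt/ITI1120 | assignments/a3.py | zero_out
-- ===== SOURCE A (Python) =====
-- def zero_out(a1, a2):
--     '''
--     (list,list)-->list
--     Take 2 lists and replace the occurrences of the 2nd list with 0 in the first list and return the result
--     '''
--
--     if len(a1) < len(a2):
--         return a1
--
--     length = len(a2)
--
--     for i in range(len(a1)):
--         if a1[i:i + length] == a2:
--             a1[i:i + length] = [0] * length
--
--     return a1
-- ===== SOURCE B (Python) =====
-- def zero_out(a1, a2):
--     '''
--     (list,list)-->list
--     Replace non-overlapping occurrences of a2 in a1 (left to right) with zeros,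
--     building a new list, str.replace-style.  (The original mutated a1 in place;
--     this version leaves a1 untouched and returns the new list.)
--     '''
--     m = len(a2)
--     if m == 0:
--         return a1
--     n = len(a1)
--     out = []
--     i = 0
--     while i < n:
--         if a1[i:i + m] == a2:
--             out.extend([0] * m)
--             i += m
--         else:
--             out.append(a1[i])
--             i += 1
--     return out
-- ===== Notes on version B (the rewrite author's own statement) =====
-- stated objective: idiomatic
-- what changed: B is the str.replace-style rewrite: one while-loop over the ORIGINAL list that builds a new output list, appending m zeros and skipping m positions at each match, instead of A's for-loop over every index that compares a fresh slice at each position and splices [0]*m into the list it is mutating; Pre_ excludes inputs where a pattern starting with 0 (but not all zeros) occurs in a1, on which A's scan can re-match zeros it has just written (a cascading replacement that is an artefact of mutating while scanning) and either behaviour is defensible. A mutates a1 in place, B does not; …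
-- outside the precondition, e.g. on zero_out([3, 0, 2, 2], [0, 2]): A returns [3, 0, 0, 0], B returns [3, 0, 0, 2]; on zero_out([0, 1, 0, 1, 0], [0, 1, 0]): A returns [0, 0, 0, 0, 0], B returns [0, 0, 0, 1, 0]
import Mathlib
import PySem

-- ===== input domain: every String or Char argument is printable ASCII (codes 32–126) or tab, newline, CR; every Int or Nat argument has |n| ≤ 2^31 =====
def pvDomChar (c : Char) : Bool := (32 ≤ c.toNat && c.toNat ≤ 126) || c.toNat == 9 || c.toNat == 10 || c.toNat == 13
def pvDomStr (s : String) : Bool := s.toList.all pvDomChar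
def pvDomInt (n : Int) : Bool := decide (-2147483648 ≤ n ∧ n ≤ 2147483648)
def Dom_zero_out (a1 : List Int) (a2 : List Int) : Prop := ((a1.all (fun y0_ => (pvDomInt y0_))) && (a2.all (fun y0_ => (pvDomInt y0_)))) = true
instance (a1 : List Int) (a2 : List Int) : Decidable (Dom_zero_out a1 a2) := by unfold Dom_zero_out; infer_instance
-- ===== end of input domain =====

-- B rebuilds the result str.replace-style: one pass over the ORIGINAL list, appending
-- zeros and skipping the pattern length at each match, instead of A's in-place
-- slice-compare-and-splice scan over the list it is mutating. A mutates a1 in place,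
-- B does not; the equivalence proved is about the return value only.


-- ===== PORT A =====
-- loop body of A: 'if a1[i:i+length] == a2: a1[i:i+length] = [0]*length';
-- the slice assignment is ported by hand as take/replicate/drop, exact since 0 ≤ i
def zeroOutStepA (a2 : List Int) (cur : List Int) (i : Nat) : List Int :=
  if PySem.List.slice cur (some (i : Int)) (some ((i : Int) + (a2.length : Int))) = a2 then
    cur.take i ++ List.replicate a2.length 0 ++ cur.drop (i + a2.length)
  else cur

def zero_out (a1 : List Int) (a2 : List Int) : List Int :=
  if a1.length < a2.length then a1
  else (List.range a1.length).foldl (zeroOutStepA a2) a1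

-- ===== PORT B =====
-- B's while loop, step for step; fuel a1.length bounds the iteration count exactly
-- (each iteration advances i by at least 1 since goB is only entered with a2 ≠ []).
def goB (a1 a2 : List Int) : Nat → Nat → List Int → List Int
  | 0, _, out => out
  | fuel+1, i, out =>
    if i < a1.length then
      if PySem.List.slice a1 (some (i : Int)) (some ((i : Int) + (a2.length : Int))) = a2 then
        goB a1 a2 fuel (i + a2.length) (out ++ List.replicate a2.length 0)
      else
        goB a1 a2 fuel (i + 1) (out ++ [a1.getD i 0])
    else out

def zero_out_alt (a1 : List Int) (a2 : List Int) : List Int :=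
  if a2.length = 0 then a1 else goB a1 a2 a1.length 0 []

-- ===== PRECONDITION & SPEC =====
-- Pre_ excludes inputs where a pattern starting with 0 (but not all zeros) occurs in a1:
-- there A's scan over the mutating list can re-match zeros it has just written (a
-- cascading replacement that is an artefact of mutating while scanning, which no caller
-- would specify), while B replaces the non-overlapping occurrences of the original list.
def Pre_zero_out (a1 : List Int) (a2 : List Int) : Prop :=
  a2.head? ≠ some 0 ∨ (∀ x ∈ a2, x = 0) ∨ ¬ (a2 <:+: a1)
instance (a1 : List Int) (a2 : List Int) : Decidable (Pre_zero_out a1 a2) := by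
  unfold Pre_zero_out; infer_instance

def pvWitness_zero_out : List Int × List Int := ([1, 2, 3, 2, 3], [2, 3])

def Spec_zero_out (a1 : List Int) (a2 : List Int) (out : List Int) : Prop := out = zero_out_alt a1 a2
instance (a1 : List Int) (a2 : List Int) (out : List Int) : Decidable (Spec_zero_out a1 a2 out) := by unfold Spec_zero_out; infer_instance

-- ===== CLAIM (what is proved, stated in full; the proofs are below) =====
def Claim_equal_zero_out : Prop := ∀ (a1 : List Int) (a2 : List Int), Dom_zero_out a1 a2 → Pre_zero_out a1 a2 → Spec_zero_out a1 a2 (zero_out a1 a2)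

-- ===== LEMMAS AND PROOFS =====

-- With an empty pattern, A's loop body is the identity.
lemma stepA_nil (cur : List Int) (i : Nat) : zeroOutStepA [] cur i = cur := by
  unfold zeroOutStepA
  have h : PySem.List.slice cur (some (i : Int)) (some ((i : Int) + ((0:Nat) : Int))) = (cur.drop i).take 0 := by
    exact PySem.List.slice_natCast_add cur i 0
  simp at h
  simp [h, List.take_append_drop]

lemma foldA_nil (l : List Nat) (cur : List Int) :
    l.foldl (zeroOutStepA []) cur = cur := by
  induction l generalizing cur with
  | nil => rfl
  | cons a t ih => simp [List.foldl, stepA_nil, ih]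

-- A window starting strictly inside a just-written block of zeros cannot match a
-- pattern whose first element is not 0, so A's step there is the identity.
lemma stepA_skip (a2 out rest : List Int) (i j : Nat)
    (h0 : a2.head? ≠ some 0) (hout : out.length = i) (hij : i < j) (hjm : j < i + a2.length) :
    zeroOutStepA a2 (out ++ (List.replicate a2.length 0 ++ rest)) j
      = out ++ (List.replicate a2.length 0 ++ rest) := by
  subst hout
  unfold zeroOutStepA
  rw [if_neg]
  intro he
  rw [PySem.List.slice_natCast_add] at he
  have hd : (out ++ (List.replicate a2.length (0:Int) ++ rest)).drop j
      = List.replicate (a2.length - (j - out.length)) (0:Int) ++ rest := by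
    rw [List.drop_append, List.drop_eq_nil_of_le (by omega : out.length ≤ j), List.nil_append,
        List.drop_append_of_le_length (by simp; omega), List.drop_replicate]
  rw [hd] at he
  obtain ⟨k, hk⟩ : ∃ k, a2.length - (j - out.length) = k + 1 :=
    ⟨a2.length - (j - out.length) - 1, by omega⟩
  rw [hk, List.replicate_succ, List.cons_append] at he
  obtain ⟨m', hm'⟩ : ∃ m', a2.length = m' + 1 := ⟨a2.length - 1, by omega⟩
  rw [hm', List.take_succ_cons] at he
  exact h0 (by rw [← he]; rfl)

lemma foldA_skip (a2 out rest : List Int) (i : Nat)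
    (h0 : a2.head? ≠ some 0) (hout : out.length = i) :
    ∀ (l : List Nat), (∀ j ∈ l, i < j ∧ j < i + a2.length) →
      l.foldl (zeroOutStepA a2) (out ++ (List.replicate a2.length 0 ++ rest))
        = out ++ (List.replicate a2.length 0 ++ rest) := by
  intro l
  induction l with
  | nil => intro _; rfl
  | cons a t ih =>
    intro hb
    rw [List.foldl_cons, stepA_skip a2 out rest i a h0 hout (hb a (by simp)).1 (hb a (by simp)).2]
    exact ih (fun j hj => hb j (by simp [hj]))

-- Main invariant: when the pattern does not start with 0, A's mutated list after
-- processing indices < i is exactly (B's output so far) ++ (the untouched tail of a1).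
lemma mainInv (a1 a2 : List Int) (h0 : a2.head? ≠ some 0) (hm : 0 < a2.length) :
    ∀ (fuel i : Nat) (out : List Int), out.length = i → a1.length - i ≤ fuel →
      (List.range' i (a1.length - i)).foldl (zeroOutStepA a2) (out ++ a1.drop i)
        = goB a1 a2 fuel i out := by
  intro fuel
  induction fuel with
  | zero =>
    intro i out hout hle
    have h1 : a1.length - i = 0 := by omega
    rw [h1, List.drop_eq_nil_of_le (by omega : a1.length ≤ i)]
    simp [goB]
  | succ fuel ih =>
    intro i out hout hle
    by_cases hi : i < a1.length
    · rw [show goB a1 a2 (fuel+1) i out = if i < a1.length then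
          (if PySem.List.slice a1 (some (i : Int)) (some ((i : Int) + (a2.length : Int))) = a2 then
            goB a1 a2 fuel (i + a2.length) (out ++ List.replicate a2.length 0)
          else goB a1 a2 fuel (i + 1) (out ++ [a1.getD i 0])) else out from rfl]
      rw [if_pos hi]
      have hcnt : a1.length - i = (a1.length - (i+1)) + 1 := by omega
      by_cases hc : PySem.List.slice a1 (some (i : Int)) (some ((i : Int) + (a2.length : Int))) = a2
      · rw [if_pos hc]
        have hc2 : (a1.drop i).take a2.length = a2 := by
          rw [← PySem.List.slice_natCast_add]; exact hc
        have him : i + a2.length ≤ a1.length := by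
          have := congrArg List.length hc2
          simp at this
          omega
        rw [hcnt, List.range'_succ, List.foldl_cons]
        have hstep : zeroOutStepA a2 (out ++ a1.drop i) i
            = out ++ (List.replicate a2.length 0 ++ a1.drop (i + a2.length)) := by
          unfold zeroOutStepA
          rw [if_pos]
          · rw [List.take_append_of_le_length (by omega), List.take_of_length_le (by omega),
                List.drop_append, List.drop_eq_nil_of_le (by omega : out.length ≤ i + a2.length),
                List.nil_append, show i + a2.length - out.length = a2.length by omega,
                show (a1.drop i).drop a2.length = a1.drop (i + a2.length) from List.drop_drop,
                List.append_assoc]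
          · rw [PySem.List.slice_natCast_add,
                List.drop_append, List.drop_eq_nil_of_le (by omega : out.length ≤ i),
                List.nil_append, show i - out.length = 0 by omega, List.drop_zero]
            exact hc2
        rw [hstep]
        have hsplit : List.range' (i+1) (a1.length - (i+1))
            = List.range' (i+1) (a2.length - 1) ++ List.range' (i + a2.length) (a1.length - (i + a2.length)) := by
          have h2 : i + a2.length = (i+1) + (a2.length - 1) := by omega
          rw [h2, List.range'_append_1]
          congr 1
          omega
        rw [hsplit, List.foldl_append]
        rw [foldA_skip a2 out (a1.drop (i + a2.length)) i h0 hout _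
          (fun j hj => by
            have := List.mem_range'_1.mp hj
            omega)]
        have hassoc : out ++ (List.replicate a2.length (0:Int) ++ a1.drop (i + a2.length))
            = (out ++ List.replicate a2.length 0) ++ a1.drop (i + a2.length) := by
          rw [List.append_assoc]
        rw [hassoc]
        exact ih (i + a2.length) (out ++ List.replicate a2.length 0) (by simp [hout]) (by omega)
      · rw [if_neg hc]
        rw [hcnt, List.range'_succ, List.foldl_cons]
        have hstep : zeroOutStepA a2 (out ++ a1.drop i) i = out ++ a1.drop i := by
          unfold zeroOutStepA
          rw [if_neg]
          rw [PySem.List.slice_natCast_add,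
              List.drop_append, List.drop_eq_nil_of_le (by omega : out.length ≤ i),
              List.nil_append, show i - out.length = 0 by omega, List.drop_zero]
          intro he
          exact hc (by rw [PySem.List.slice_natCast_add]; exact he)
        rw [hstep]
        have hre : out ++ a1.drop i = (out ++ [a1.getD i 0]) ++ a1.drop (i+1) := by
          rw [List.append_assoc, List.singleton_append]
          congr 1
          rw [List.getD_eq_getElem a1 0 hi, List.drop_eq_getElem_cons hi]
        rw [hre]
        exact ih (i+1) (out ++ [a1.getD i 0]) (by simp [hout]) (by omega)
    · have h1 : a1.length - i = 0 := by omega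
      rw [h1, List.drop_eq_nil_of_le (by omega : a1.length ≤ i)]
      simp [goB, hi]

-- When every matching window is forced to be all zeros (no occurrence at all, a1 too
-- short, or an all-zero pattern), B just copies a1.
lemma goB_inert (a1 a2 : List Int) (hm : 0 < a2.length)
    (H : ∀ i, i < a1.length → (a1.drop i).take a2.length = a2 → a2 = List.replicate a2.length 0) :
    ∀ (fuel i : Nat) (out : List Int), a1.length - i ≤ fuel →
      goB a1 a2 fuel i out = out ++ a1.drop i := by
  intro fuel
  induction fuel with
  | zero =>
    intro i out hle
    rw [List.drop_eq_nil_of_le (by omega : a1.length ≤ i)]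
    simp [goB]
  | succ fuel ih =>
    intro i out hle
    by_cases hi : i < a1.length
    · rw [show goB a1 a2 (fuel+1) i out = if i < a1.length then
          (if PySem.List.slice a1 (some (i : Int)) (some ((i : Int) + (a2.length : Int))) = a2 then
            goB a1 a2 fuel (i + a2.length) (out ++ List.replicate a2.length 0)
          else goB a1 a2 fuel (i + 1) (out ++ [a1.getD i 0])) else out from rfl]
      rw [if_pos hi]
      by_cases hc : PySem.List.slice a1 (some (i : Int)) (some ((i : Int) + (a2.length : Int))) = a2
      · rw [if_pos hc]
        have hc2 : (a1.drop i).take a2.length = a2 := by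
          rw [← PySem.List.slice_natCast_add]; exact hc
        rw [ih (i + a2.length) _ (by omega), List.append_assoc]
        congr 1
        rw [show a1.drop (i + a2.length) = (a1.drop i).drop a2.length from List.drop_drop.symm,
            show List.replicate a2.length (0:Int) = (a1.drop i).take a2.length from
              ((H i hi hc2).symm.trans hc2.symm)]
        exact List.take_append_drop _ _
      · rw [if_neg hc]
        rw [ih (i+1) _ (by omega), List.append_assoc, List.singleton_append]
        congr 1
        rw [List.getD_eq_getElem a1 0 hi, List.drop_eq_getElem_cons hi]
    · rw [List.drop_eq_nil_of_le (by omega : a1.length ≤ i)]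
      simp [goB, hi]

-- Under the same hypothesis, A's step (hence its whole loop) is the identity.
lemma stepA_inert (a1 a2 : List Int)
    (H : ∀ i, i < a1.length → (a1.drop i).take a2.length = a2 → a2 = List.replicate a2.length 0)
    (i : Nat) : zeroOutStepA a2 a1 i = a1 := by
  unfold zeroOutStepA
  by_cases hc : PySem.List.slice a1 (some (i : Int)) (some ((i : Int) + (a2.length : Int))) = a2
  · rw [if_pos hc]
    have hc2 : (a1.drop i).take a2.length = a2 := by
      rw [← PySem.List.slice_natCast_add]; exact hc
    by_cases hi : i < a1.length
    · rw [show a1.drop (i + a2.length) = (a1.drop i).drop a2.length from List.drop_drop.symm,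
          show List.replicate a2.length (0:Int) = (a1.drop i).take a2.length from
            ((H i hi hc2).symm.trans hc2.symm),
          List.append_assoc, List.take_append_drop, List.take_append_drop]
    · have hnil : a1.drop i = [] := List.drop_eq_nil_of_le (by omega)
      rw [hnil] at hc2
      simp at hc2
      subst hc2
      rw [List.take_of_length_le (Nat.le_of_not_lt hi)]
      simp [hnil]
  · rw [if_neg hc]

lemma foldA_inert (a1 a2 : List Int)
    (H : ∀ i, i < a1.length → (a1.drop i).take a2.length = a2 → a2 = List.replicate a2.length 0) :
    ∀ (l : List Nat), l.foldl (zeroOutStepA a2) a1 = a1 := by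
  intro l
  induction l with
  | nil => rfl
  | cons a t ih => rw [List.foldl_cons, stepA_inert a1 a2 H a, ih]

-- ===== VERDICT (by name: the statement is the Claim_ definition above) =====
theorem zero_out_spec : Claim_equal_zero_out := by
  intro a1 a2 _ hpre
  unfold Spec_zero_out zero_out zero_out_alt
  by_cases hm0 : a2.length = 0
  · have h2 : a2 = [] := List.eq_nil_of_length_eq_zero hm0
    subst h2
    simp [foldA_nil]
  · have hm : 0 < a2.length := Nat.pos_of_ne_zero hm0
    rw [if_neg hm0]
    by_cases hn : a1.length < a2.length
    · rw [if_pos hn]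
      have H : ∀ i, i < a1.length → (a1.drop i).take a2.length = a2 → a2 = List.replicate a2.length 0 := by
        intro i hi he
        exfalso
        have := congrArg List.length he
        simp at this
        omega
      rw [goB_inert a1 a2 hm H a1.length 0 [] (by omega)]
      simp
    · rw [if_neg hn]
      rcases hpre with h0 | hall | hninf
      · have h := mainInv a1 a2 h0 hm a1.length 0 [] rfl (by omega)
        simpa [List.range_eq_range'] using h
      · have H : ∀ i, i < a1.length → (a1.drop i).take a2.length = a2 → a2 = List.replicate a2.length 0 := by
          intro i hi he
          have := List.eq_replicate_of_mem hall
          simpa using this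
        rw [foldA_inert a1 a2 H, goB_inert a1 a2 hm H a1.length 0 [] (by omega)]
        simp
      · have H : ∀ i, i < a1.length → (a1.drop i).take a2.length = a2 → a2 = List.replicate a2.length 0 := by
          intro i hi he
          refine absurd ⟨a1.take i, (a1.drop i).drop a2.length, ?_⟩ hninf
          rw [← he, List.append_assoc,
              show ((a1.drop i).take a2.length).length = a2.length from by rw [he],
              List.take_append_drop, List.take_append_drop]
        rw [foldA_inert a1 a2 H, goB_inert a1 a2 hm H a1.length 0 [] (by omega)]
        simp
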